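-- pv_equiv track=rewrite | github.com/imallarino2015/Unlock-Patterns | src/validate.py | getValidity
-- ===== SOURCE A (Python) =====
-- def formatListToCSV(l):
-- 	s=""
-- 	for item in l:
-- 		s+="\""+str(item)+"\","
-- 	s=s[:-1]
-- 	return s
--
-- def isConsecutive(valueList,orderedItems):
-- 	return formatListToCSV(orderedItems) in formatListToCSV(valueList)
--
-- def getValidity(li,state):
-- 	valOrders=[
-- 		["0","1","2"],	# Rule 1: No 0 <-> 2 without 1
-- 		["3","4","5"],	# Rule 2: No 3 <-> 5 without 4
-- 		["6","7","8"],	# Rule 3: No 6 <-> 8 without 7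
-- 		["0","3","6"],	# Rule 4: No 0 <-> 6 without 3
-- 		["1","4","7"],	# Rule 5: No 1 <-> 7 without 4
-- 		["2","5","8"],	# Rule 6: No 2 <-> 8 without 5
-- 		["0","4","8"],	# Rule 7: No 0 <-> 8 without 4
-- 		["2","4","6"]	# Rule 8: No 2 <-> 6 without 4
-- 	]
-- 	for v in valOrders:
-- 		if isConsecutive(li, [v[0], v[2]]):
-- 			for item in li:
-- 				if str(item) == v[1]:
-- 					break
-- 				if str(item) == v[2]:
-- 					return False
-- 		if isConsecutive(li, [v[2], v[0]]):
-- 			for item in li: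
-- 				if str(item) == v[1]:
-- 					break
-- 				if str(item) == v[0]:
-- 					return False
-- 	return state
-- ===== SOURCE B (Python) =====
-- # Data-driven single pass: instead of testing each of the 8 rules against the
-- # whole list (A's CSV-serialize + substring search per rule), B walks the list's
-- # consecutive pairs ONCE and classifies each pair with a precomputed skip-pair
-- # table mapping an endpoint pair to the knight-jumped middle key.
-- MID = {
--     ("0", "2"): "1", ("2", "0"): "1",
--     ("3", "5"): "4", ("5", "3"): "4",
--     ("6", "8"): "7", ("8", "6"): "7",
--     ("0", "6"): "3", ("6", "0"): "3",
--     ("1", "7"): "4", ("7", "1"): "4",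
--     ("2", "8"): "5", ("8", "2"): "5",
--     ("0", "8"): "4", ("8", "0"): "4",
--     ("2", "6"): "4", ("6", "2"): "4",
-- }
--
-- def getValidity(li, state):
--     s = [str(x) for x in li]
--     big = len(s)
--     pos = {}
--     for i, x in enumerate(s):
--         pos.setdefault(x, i)
--     for x, y in zip(s, s[1:]):
--         m = MID.get((x, y))
--         if m is not None and pos.get(y, big) < pos.get(m, big):
--             return False
--     return state
-- ===== Notes on version B (the rewrite author's own statement) =====
-- stated objective: faster
-- what changed: B inverts the traversal: instead of A's loop over the 8 rules, each re-serializing the whole list to a quoted-CSV string and substring-searching it, B makes one pass over the list's consecutive pairs, classifying each pair through a precomputed skip-pair-to-middle table and comparing first-occurrence indices built in a single preliminary pass.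
-- outside the precondition, e.g. on getValidity(['2', '0","2'], True): A returns False, B returns True
import Mathlib
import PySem

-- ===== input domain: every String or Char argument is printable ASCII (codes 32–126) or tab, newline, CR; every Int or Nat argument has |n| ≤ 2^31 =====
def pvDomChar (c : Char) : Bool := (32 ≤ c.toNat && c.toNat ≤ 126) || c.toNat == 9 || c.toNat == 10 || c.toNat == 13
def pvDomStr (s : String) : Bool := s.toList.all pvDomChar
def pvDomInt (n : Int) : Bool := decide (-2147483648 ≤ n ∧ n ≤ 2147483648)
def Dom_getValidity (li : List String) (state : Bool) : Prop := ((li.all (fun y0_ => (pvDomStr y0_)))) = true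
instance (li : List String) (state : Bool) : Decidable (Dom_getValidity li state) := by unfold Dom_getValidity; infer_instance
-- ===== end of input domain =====

-- B inverts the traversal: one pass over the list's consecutive pairs classified by a
-- precomputed skip-pair→middle table, instead of A's loop over 8 rules each re-serializing
-- the list to quoted CSV and substring-searching it (objective: faster).

-- ===== PORT A =====
-- Python builds str values; ported on List Char (PySem.Chars), as PYSEM prescribes.
def formatListToCSV (l : List String) : List Char :=
  let s := l.foldl (fun s item => s ++ ('"' :: item.toList ++ ['"', ','])) []
  PySem.List.slice s none (some (-1))

def isConsecutive (valueList orderedItems : List String) : Bool :=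
  PySem.Chars.isIn (formatListToCSV orderedItems) (formatListToCSV valueList)

-- the inner 'for item in li: if item == mid: break; if item == target: return False'
def scanA (mid target : String) : List String → Bool
  | [] => false
  | x :: rest => if x == mid then false else if x == target then true else scanA mid target rest

def valOrders : List (List String) :=
  [["0","1","2"], ["3","4","5"], ["6","7","8"], ["0","3","6"],
   ["1","4","7"], ["2","5","8"], ["0","4","8"], ["2","4","6"]]

def goA (li : List String) (state : Bool) : List (List String) → Bool
  | [] => state
  | v :: rest =>
    if isConsecutive li [PySem.List.pyGetD v 0 "", PySem.List.pyGetD v 2 ""]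
        && scanA (PySem.List.pyGetD v 1 "") (PySem.List.pyGetD v 2 "") li then false
    else if isConsecutive li [PySem.List.pyGetD v 2 "", PySem.List.pyGetD v 0 ""]
        && scanA (PySem.List.pyGetD v 1 "") (PySem.List.pyGetD v 0 "") li then false
    else goA li state rest

def getValidity (li : List String) (state : Bool) : Bool :=
  goA li state valOrders

-- ===== PORT B =====
-- the module-level constant MID of Source B
def midTable : PySem.Dict (String × String) String :=
  PySem.Dict.ofList
    [(("0","2"),"1"), (("2","0"),"1"), (("3","5"),"4"), (("5","3"),"4"),
     (("6","8"),"7"), (("8","6"),"7"), (("0","6"),"3"), (("6","0"),"3"),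
     (("1","7"),"4"), (("7","1"),"4"), (("2","8"),"5"), (("8","2"),"5"),
     (("0","8"),"4"), (("8","0"),"4"), (("2","6"),"4"), (("6","2"),"4")]

-- pos = {}; for i, x in enumerate(s): pos.setdefault(x, i)
def buildPos (s : List String) : PySem.Dict String Int :=
  (PySem.List.enumerate s 0).foldl (fun d p => d.setdefault p.2 p.1) PySem.Dict.empty

-- for x, y in zip(s, s[1:]): m = MID.get((x, y)); if m is not None and …: return False
def goB (pos : PySem.Dict String Int) (big : Int) (state : Bool) : List (String × String) → Bool
  | [] => state
  | (x, y) :: rest =>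
    match midTable.get? (x, y) with
    | some m => if pos.getD y big < pos.getD m big then false else goB pos big state rest
    | none => goB pos big state rest

def getValidity_alt (li : List String) (state : Bool) : Bool :=
  let s := li  -- str(x) on a str is the identity
  let big : Int := PySem.List.len s
  let pos := buildPos s
  goB pos big state (s.zip (PySem.List.slice s (some 1) none))

-- ===== PRECONDITION & SPEC =====
-- Pre_ excludes lists with an element containing the double-quote character: there A's
-- quoted-CSV encoding is ambiguous (distinct lists serialize to overlapping quoted text),
-- so its substring test can report adjacencies the list does not have; B reads the list
-- itself, and either reading of such an ambiguous encoding is defensible.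
def Pre_getValidity (li : List String) (state : Bool) : Prop :=
  ∀ s ∈ li, '"' ∉ s.toList
instance (li : List String) (state : Bool) : Decidable (Pre_getValidity li state) := by
  unfold Pre_getValidity; infer_instance

def pvWitness_getValidity : List String × Bool := (["0", "4", "2"], true)

def Spec_getValidity (li : List String) (state : Bool) (out : Bool) : Prop := out = getValidity_alt li state
instance (li : List String) (state : Bool) (out : Bool) : Decidable (Spec_getValidity li state out) := by unfold Spec_getValidity; infer_instance

-- ===== CLAIM (what is proved, stated in full; the proofs are below) =====
def Claim_equal_getValidity : Prop := ∀ (li : List String) (state : Bool), Dom_getValidity li state → Pre_getValidity li state → Spec_getValidity li state (getValidity li state)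

-- ===== LEMMAS AND PROOFS =====

-- Denotation of formatListToCSV: quoted elements joined by ','.
def fmtD : List String → List Char
  | [] => []
  | [x] => '"' :: x.toList ++ ['"']
  | x :: r => '"' :: x.toList ++ '"' :: ',' :: fmtD r

def tailD : List String → List Char
  | [] => []
  | h :: r => ',' :: fmtD (h :: r)

def patP (a b : Char) : List Char := ['"', a, '"', ',', '"', b, '"']

lemma fmtD_cons_eq (x : String) (r : List String) :
    fmtD (x :: r) = '"' :: (x.toList ++ '"' :: tailD r) := by
  cases r <;> simp [fmtD, tailD]

lemma fmt_eq (l : List String) : formatListToCSV l = fmtD l := by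
  show PySem.List.slice (List.foldl (fun s item => s ++ ('"' :: item.toList ++ ['"', ','])) [] l) none (some (-1)) = fmtD l
  rw [PySem.List.foldl_append_eq_flatMap, PySem.List.slice_to_neg_one, List.nil_append]
  induction l with
  | nil => simp [fmtD]
  | cons x r ih =>
    cases r with
    | nil =>
      show (('"' :: x.toList ++ ['"', ',']) ++ []).dropLast = fmtD [x]
      have : ('"' :: x.toList ++ ['"', ',']) ++ [] = ('"' :: x.toList ++ ['"']) ++ [','] := by simp
      rw [this, List.dropLast_concat]; simp [fmtD]
    | cons y t =>
      have hne : List.flatMap (fun item => '"' :: item.toList ++ ['"', ',']) (y :: t) ≠ [] := by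
        rw [List.flatMap_cons]; simp
      rw [List.flatMap_cons, List.dropLast_append_of_ne_nil hne, ih]
      simp [fmtD]

lemma pref_quote (a : Char) (ha : a ≠ '"') (x : List Char) (hx : '"' ∉ x) (z w : List Char) :
    (a :: '"' :: z <+: x ++ '"' :: w) ↔ x = [a] ∧ z <+: w := by
  match x, hx with
  | [], _ =>
    constructor
    · intro h
      rcases List.cons_prefix_cons.mp h with ⟨h1, _⟩
      exact absurd h1 ha
    · rintro ⟨h, -⟩; cases h
  | [c], _ =>
    constructor
    · intro h
      rcases List.cons_prefix_cons.mp h with ⟨h1, h2⟩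
      rcases List.cons_prefix_cons.mp h2 with ⟨-, h3⟩
      exact ⟨by simp [h1], h3⟩
    · rintro ⟨h, h2⟩
      have : c = a := by simpa using h
      subst this
      exact List.cons_prefix_cons.mpr ⟨rfl, List.cons_prefix_cons.mpr ⟨rfl, h2⟩⟩
  | c :: d :: t, hx =>
    constructor
    · intro h
      rcases List.cons_prefix_cons.mp h with ⟨h1, h2⟩
      rcases List.cons_prefix_cons.mp h2 with ⟨h3, -⟩
      exact absurd h3 (by simp at hx; exact hx.2.1)
    · rintro ⟨h, -⟩; simp at h

lemma pref_fmt (a b : Char) (ha : a ≠ '"') (hb : b ≠ '"') (x : String) (r : List String)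
    (hx : '"' ∉ x.toList) (hr : ∀ s ∈ r, '"' ∉ s.toList) :
    (patP a b <+: fmtD (x :: r)) ↔ x.toList = [a] ∧ ∃ h r', r = h :: r' ∧ h.toList = [b] := by
  rw [fmtD_cons_eq]
  show ('"' :: (a :: '"' :: [',', '"', b, '"']) <+: '"' :: (x.toList ++ '"' :: tailD r)) ↔ _
  rw [List.cons_prefix_cons]
  simp only [true_and]
  rw [pref_quote a ha x.toList hx]
  cases r with
  | nil =>
    simp [tailD]
  | cons h r' =>
    have hh : '"' ∉ h.toList := hr h (by simp)
    constructor
    · rintro ⟨hx1, hpre⟩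
      refine ⟨hx1, h, r', rfl, ?_⟩
      rcases List.cons_prefix_cons.mp (show ([',', '"', b, '"'] : List Char) <+: ',' :: fmtD (h :: r') from hpre) with ⟨-, h2⟩
      rw [fmtD_cons_eq] at h2
      rcases List.cons_prefix_cons.mp h2 with ⟨-, h3⟩
      exact ((pref_quote b hb h.toList hh [] (tailD r')).mp h3).1
    · rintro ⟨hx1, h0, r0, heq, hb0⟩
      injection heq with e1 e2
      subst e1; subst e2
      refine ⟨hx1, ?_⟩
      show ([',', '"', b, '"'] : List Char) <+: ',' :: fmtD (h :: r')
      refine List.cons_prefix_cons.mpr ⟨rfl, ?_⟩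
      rw [fmtD_cons_eq]
      refine List.cons_prefix_cons.mpr ⟨rfl, ?_⟩
      exact (pref_quote b hb h.toList hh [] (tailD r')).mpr ⟨hb0, List.nil_prefix⟩

lemma aux2 (a b : Char) (ha : a ≠ ',') (r : List String) :
    ∀ (y : List Char), '"' ∉ y →
      ((patP a b <:+: y ++ '"' :: tailD r) ↔ patP a b <:+: fmtD r) := by
  intro y
  induction y with
  | nil =>
    intro _
    rw [List.nil_append, List.infix_cons_iff]
    constructor
    · rintro (hpre | hinf)
      · exfalso
        rcases List.cons_prefix_cons.mp hpre with ⟨-, h2⟩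
        cases r with
        | nil =>
          rcases h2 with ⟨w, hw⟩
          simp [tailD] at hw
        | cons h r' =>
          rcases List.cons_prefix_cons.mp (show a :: ('"' :: [',', '"', b, '"']) <+: ',' :: fmtD (h :: r') from h2) with ⟨h3, -⟩
          exact ha h3
      · cases r with
        | nil => simpa [tailD, fmtD] using hinf
        | cons h r' =>
          rcases List.infix_cons_iff.mp hinf with (hpre | hinf2)
          · exfalso
            rcases List.cons_prefix_cons.mp hpre with ⟨h1, -⟩
            exact absurd h1 (by decide)
          · exact hinf2
    · intro hinf
      refine Or.inr ?_
      cases r with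
      | nil => simpa [tailD, fmtD] using hinf
      | cons h r' => exact hinf.trans (List.suffix_cons ',' (fmtD (h :: r'))).isInfix
  | cons c y' ih =>
    intro hy
    have hc : c ≠ '"' := by simp at hy; exact Ne.symm hy.1
    have hy' : '"' ∉ y' := by simp at hy; exact hy.2
    rw [List.cons_append, List.infix_cons_iff]
    constructor
    · rintro (hpre | hinf)
      · exfalso
        rcases List.cons_prefix_cons.mp hpre with ⟨h1, -⟩
        exact hc h1.symm
      · exact (ih hy').mp hinf
    · intro h
      exact Or.inr ((ih hy').mpr h)

lemma aux1 (a b : Char) (ha : a ≠ '"') (ha2 : a ≠ ',') (hb : b ≠ '"') (u v : String)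
    (hu : u.toList = [a]) (hv : v.toList = [b]) :
    ∀ (li : List String), (∀ s ∈ li, '"' ∉ s.toList) →
      ((patP a b <:+: fmtD li) ↔ (u, v) ∈ li.zip li.tail) := by
  intro li
  induction li with
  | nil =>
    intro _
    simp [fmtD, patP]
  | cons x r ih =>
    intro hp
    have hx : '"' ∉ x.toList := hp x (by simp)
    have hr : ∀ s ∈ r, '"' ∉ s.toList := fun s hs => hp s (by simp [hs])
    rw [fmtD_cons_eq, List.infix_cons_iff]
    have h2 : (patP a b <:+: x.toList ++ '"' :: tailD r) ↔ patP a b <:+: fmtD r :=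
      aux2 a b ha2 r x.toList hx
    have h1 : (patP a b <+: '"' :: (x.toList ++ '"' :: tailD r)) ↔
        x.toList = [a] ∧ ∃ h r', r = h :: r' ∧ h.toList = [b] := by
      rw [← fmtD_cons_eq]; exact pref_fmt a b ha hb x r hx hr
    rw [show (patP a b <+: '"' :: (x.toList ++ '"' :: tailD r)) = (patP a b <+: ('"' :: (x.toList ++ '"' :: tailD r))) from rfl]
    rw [h1, h2, ih hr]
    cases r with
    | nil =>
      simp
    | cons hh rr =>
      constructor
      · rintro (⟨hxa, h0, r0, heq, hb0⟩ | hmem)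
        · cases heq
          have hxu : x = u := String.toList_inj.mp (hxa.trans hu.symm)
          have hhv : hh = v := String.toList_inj.mp (hb0.trans hv.symm)
          show (u, v) ∈ (x, hh) :: (hh :: rr).zip rr
          apply List.mem_cons.mpr
          left
          rw [hxu, hhv]
        · show (u, v) ∈ (x, hh) :: (hh :: rr).zip rr
          exact List.mem_cons_of_mem _ hmem
      · intro hmem
        rcases List.mem_cons.mp hmem with heq | hmem2
        · have h1 : u = x ∧ v = hh := by
            have := heq
            rw [Prod.mk.injEq] at this
            exact this
          exact Or.inl ⟨by rw [← h1.1, hu], hh, rr, rfl, by rw [← h1.2, hv]⟩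
        · exact Or.inr hmem2

lemma scanA_eq (m t : String) : ∀ li : List String, scanA m t li = decide (li.idxOf t < li.idxOf m) := by
  intro li
  induction li with
  | nil => simp [scanA, List.idxOf]
  | cons x r ih =>
    show (if x == m then false else if x == t then true else scanA m t r) = _
    by_cases hm : x = m
    · subst hm
      simp [List.idxOf_cons]
    · by_cases ht : x = t
      · subst ht
        have h1 : (x == m) = false := by simp [hm]
        simp [h1, hm]
      · have h1 : (x == m) = false := by simp [hm]
        have h2 : (x == t) = false := by simp [ht]
        simp only [h1, h2, Bool.false_eq_true, if_false, ih, List.idxOf_cons, Bool.cond_eq_ite]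
        rw [Bool.eq_iff_iff]
        simp

lemma pos_go (x : String) (dflt : Int) :
    ∀ (li : List String) (s : Int) (d : PySem.Dict String Int),
      ((PySem.List.enumerate li s).foldl (fun d p => d.setdefault p.2 p.1) d).getD x dflt
        = if d.contains x then d.getD x dflt
          else if x ∈ li then s + (li.idxOf x : Int) else dflt := by
  intro li
  induction li with
  | nil =>
    intro s d
    rw [PySem.List.enumerate_nil]
    simp only [List.foldl_nil, List.not_mem_nil, if_false]
    by_cases hc : d.contains x
    · simp [hc]
    · simp only [Bool.not_eq_true] at hc
      simp [hc, PySem.Dict.getD_of_not_contains d dflt hc]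
  | cons h r ih =>
    intro s d
    rw [PySem.List.enumerate_cons, List.foldl_cons]
    rw [ih]
    by_cases hxh : x = h
    · subst hxh
      rw [PySem.Dict.contains_setdefault]
      simp only [BEq.rfl, Bool.true_or, if_true]
      rw [PySem.Dict.getD_setdefault_self]
      by_cases hc : d.contains x
      · simp only [hc, if_true]
        rw [PySem.Dict.getD_eq_get?_getD, PySem.Dict.getD_eq_get?_getD]
        rcases (PySem.Dict.contains_eq_isSome_get? d x ▸ hc : (d.get? x).isSome = true) with h2
        rcases Option.isSome_iff_exists.mp h2 with ⟨v, hv⟩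
        simp [hv]
      · simp only [Bool.not_eq_true] at hc
        rw [PySem.Dict.getD_of_not_contains d s hc]
        simp [hc]
    · rw [PySem.Dict.contains_setdefault]
      have hne : (x == h) = false := by simp [hxh]
      rw [hne]
      simp only [Bool.false_or]
      by_cases hc : d.contains x
      · simp only [hc, if_true]
        rw [PySem.Dict.getD_eq_get?_getD, PySem.Dict.getD_eq_get?_getD,
          PySem.Dict.get?_setdefault_of_ne d s hxh]
      · simp only [hc]
        have hmem : x ∈ h :: r ↔ x ∈ r := by simp [hxh]
        rw [if_congr hmem rfl rfl]
        by_cases hm : x ∈ r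
        · simp only [hm, if_true]
          rw [List.idxOf_cons]
          have : (h == x) = false := by
            rw [beq_eq_false_iff_ne]; exact fun e => hxh e.symm
          simp [this]
          ring
        · simp [hm]

lemma pos_final (li : List String) (x : String) :
    (buildPos li).getD x (li.length : Int) = (li.idxOf x : Int) := by
  show ((PySem.List.enumerate li 0).foldl (fun d p => d.setdefault p.2 p.1) PySem.Dict.empty).getD x (li.length : Int) = _
  rw [pos_go]
  rw [PySem.Dict.contains_empty]
  simp only [Bool.false_eq_true, if_false]
  by_cases hm : x ∈ li
  · simp [hm]
  · simp [hm]

lemma pyGetD3_zero (x y z : String) : PySem.List.pyGetD [x, y, z] 0 "" = x := rfl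
lemma pyGetD3_one (x y z : String) : PySem.List.pyGetD [x, y, z] 1 "" = y := rfl
lemma pyGetD3_two (x y z : String) : PySem.List.pyGetD [x, y, z] 2 "" = z := rfl

-- A's per-rule, per-direction condition, characterized over the list itself.
lemma cond_eq (li : List String) (hp : ∀ s ∈ li, '"' ∉ s.toList) (a b : Char) (u m v : String)
    (hu : u.toList = [a]) (hv : v.toList = [b])
    (ha : a ≠ '"') (ha2 : a ≠ ',') (hb : b ≠ '"') :
    (isConsecutive li [u, v] && scanA m v li)
      = (decide ((u, v) ∈ li.zip li.tail) && decide (li.idxOf v < li.idxOf m)) := by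
  rw [Bool.eq_iff_iff]
  simp only [Bool.and_eq_true, decide_eq_true_eq]
  rw [scanA_eq]
  have hfmt2 : formatListToCSV [u, v] = patP a b := by
    rw [fmt_eq]
    simp [fmtD, patP, hu, hv]
  have h1 : isConsecutive li [u, v] = true ↔ (u, v) ∈ li.zip li.tail := by
    show PySem.Chars.isIn (formatListToCSV [u, v]) (formatListToCSV li) = true ↔ _
    rw [hfmt2, fmt_eq, PySem.Chars.isIn_iff_infix]
    exact aux1 a b ha ha2 hb u v hu hv li hp
  rw [h1]
  simp

-- A's combined condition for one rule line v = [a, mid, b].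
def condA (li : List String) (v : List String) : Bool :=
  (isConsecutive li [PySem.List.pyGetD v 0 "", PySem.List.pyGetD v 2 ""]
      && scanA (PySem.List.pyGetD v 1 "") (PySem.List.pyGetD v 2 "") li)
  || (isConsecutive li [PySem.List.pyGetD v 2 "", PySem.List.pyGetD v 0 ""]
      && scanA (PySem.List.pyGetD v 1 "") (PySem.List.pyGetD v 0 "") li)

lemma goA_eq (li : List String) (state : Bool) :
    ∀ vs, goA li state vs = (!(vs.any (condA li)) && state) := by
  intro vs
  induction vs with
  | nil => simp [goA]
  | cons v rest ih =>
    show (if _ && _ then false else if _ && _ then false else goA li state rest) = _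
    rw [List.any_cons, ih]
    unfold condA
    cases h1 : (isConsecutive li [PySem.List.pyGetD v 0 "", PySem.List.pyGetD v 2 ""]
        && scanA (PySem.List.pyGetD v 1 "") (PySem.List.pyGetD v 2 "") li) <;>
      cases h2 : (isConsecutive li [PySem.List.pyGetD v 2 "", PySem.List.pyGetD v 0 ""]
        && scanA (PySem.List.pyGetD v 1 "") (PySem.List.pyGetD v 0 "") li) <;>
      simp

-- B's per-pair condition, with positions already traded for first-occurrence indices.
def predB (li : List String) (p : String × String) : Bool :=
  match midTable.get? p with
  | some m => decide (li.idxOf p.2 < li.idxOf m)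
  | none => false

lemma goB_eq (li : List String) (state : Bool) :
    ∀ ps, goB (buildPos li) (li.length : Int) state ps = (!(ps.any (predB li)) && state) := by
  intro ps
  induction ps with
  | nil => simp [goB]
  | cons p rest ih =>
    obtain ⟨x, y⟩ := p
    show goB (buildPos li) (li.length : Int) state ((x, y) :: rest) = _
    rw [List.any_cons]
    cases h : midTable.get? (x, y) with
    | none =>
      have hred : goB (buildPos li) (li.length : Int) state ((x, y) :: rest)
          = goB (buildPos li) (li.length : Int) state rest := by
        simp only [goB, h]
      rw [hred]
      simp [predB, h, ih]
    | some m =>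
      have hred : goB (buildPos li) (li.length : Int) state ((x, y) :: rest)
          = if (buildPos li).getD y (li.length : Int) < (buildPos li).getD m (li.length : Int)
            then false else goB (buildPos li) (li.length : Int) state rest := by
        simp only [goB, h]
      rw [hred, pos_final, pos_final]
      by_cases hlt : li.idxOf y < li.idxOf m
      · rw [if_pos (by exact_mod_cast hlt)]
        simp [predB, h, hlt]
      · rw [if_neg (by exact_mod_cast hlt)]
        simp [predB, h, hlt, ih]

-- one direction of one rule fires in A ⇒ some pair fires in B
lemma stepB (li : List String) (u m v : String)
    (ht : midTable.get? (u, v) = some m)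
    (hmem : (u, v) ∈ li.zip li.tail) (hcmp : li.idxOf v < li.idxOf m) :
    ∃ p ∈ li.zip li.tail, predB li p = true :=
  ⟨(u, v), hmem, by simp [predB, ht, hcmp]⟩

-- a firing pair in B ⇒ the corresponding direction of A's condition (via cond_eq)
lemma stepA (li : List String) (hp : ∀ s ∈ li, '"' ∉ s.toList) (a b : Char) (u m v : String)
    (hu : u.toList = [a]) (hv : v.toList = [b])
    (ha : a ≠ '"') (ha2 : a ≠ ',') (hb : b ≠ '"')
    (hmem : (u, v) ∈ li.zip li.tail) (hcmp : li.idxOf v < li.idxOf m) :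
    (isConsecutive li [u, v] && scanA m v li) = true := by
  rw [cond_eq li hp a b u m v hu hv ha ha2 hb]
  simp [hmem, hcmp]

lemma any16 (li : List String) (hp : ∀ s ∈ li, '"' ∉ s.toList) :
    valOrders.any (condA li) = (li.zip li.tail).any (predB li) := by
  rw [Bool.eq_iff_iff]
  simp only [List.any_eq_true]
  constructor
  · rintro ⟨v, hv, hc⟩
    have hv' : v = ["0","1","2"] ∨ v = ["3","4","5"] ∨ v = ["6","7","8"] ∨ v = ["0","3","6"] ∨
        v = ["1","4","7"] ∨ v = ["2","5","8"] ∨ v = ["0","4","8"] ∨ v = ["2","4","6"] := by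
      simpa [valOrders] using hv
    rcases hv' with h | h | h | h | h | h | h | h <;> subst h <;>
      · unfold condA at hc
        rw [pyGetD3_zero, pyGetD3_one, pyGetD3_two] at hc
        rcases Bool.or_eq_true_iff.mp hc with hd | hd <;>
          · rw [cond_eq li hp _ _ _ _ _ rfl rfl (by decide) (by decide) (by decide)] at hd
            simp only [Bool.and_eq_true, decide_eq_true_eq] at hd
            exact stepB li _ _ _ rfl hd.1 hd.2
  · rintro ⟨p, hmem, hpred⟩
    unfold predB at hpred
    cases hm : midTable.get? p with
    | none => rw [hm] at hpred; simp at hpred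
    | some m =>
      rw [hm] at hpred
      simp only [decide_eq_true_eq] at hpred
      have hit : (p, m) ∈ midTable.items := PySem.Dict.mem_items_of_get?_eq_some midTable hm
      have hit' : (p, m) = ((("0","2"),"1") : (String × String) × String) ∨ (p, m) = (("2","0"),"1") ∨
          (p, m) = (("3","5"),"4") ∨ (p, m) = (("5","3"),"4") ∨
          (p, m) = (("6","8"),"7") ∨ (p, m) = (("8","6"),"7") ∨
          (p, m) = (("0","6"),"3") ∨ (p, m) = (("6","0"),"3") ∨
          (p, m) = (("1","7"),"4") ∨ (p, m) = (("7","1"),"4") ∨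
          (p, m) = (("2","8"),"5") ∨ (p, m) = (("8","2"),"5") ∨
          (p, m) = (("0","8"),"4") ∨ (p, m) = (("8","0"),"4") ∨
          (p, m) = (("2","6"),"4") ∨ (p, m) = (("6","2"),"4") := by
        have : midTable.items = [(("0","2"),"1"), (("2","0"),"1"), (("3","5"),"4"), (("5","3"),"4"),
            (("6","8"),"7"), (("8","6"),"7"), (("0","6"),"3"), (("6","0"),"3"),
            (("1","7"),"4"), (("7","1"),"4"), (("2","8"),"5"), (("8","2"),"5"),
            (("0","8"),"4"), (("8","0"),"4"), (("2","6"),"4"), (("6","2"),"4")] := by decide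
        rw [this] at hit
        simpa using hit
    -- each case: name the rule line and the direction
      rcases hit' with h | h | h | h | h | h | h | h | h | h | h | h | h | h | h | h <;>
        · obtain ⟨hp', hm'⟩ := Prod.mk.injEq .. ▸ (by exact h : (p, m) = _)
          subst hm'
          rw [hp'] at hmem hpred
          first
          | exact ⟨["0","1","2"], by simp [valOrders], by
              unfold condA; rw [pyGetD3_zero, pyGetD3_one, pyGetD3_two]
              first
              | exact Bool.or_eq_true_iff.mpr (Or.inl (stepA li hp '0' '2' "0" "1" "2" rfl rfl (by decide) (by decide) (by decide) hmem hpred))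
              | exact Bool.or_eq_true_iff.mpr (Or.inr (stepA li hp '2' '0' "2" "1" "0" rfl rfl (by decide) (by decide) (by decide) hmem hpred))⟩
          | exact ⟨["3","4","5"], by simp [valOrders], by
              unfold condA; rw [pyGetD3_zero, pyGetD3_one, pyGetD3_two]
              first
              | exact Bool.or_eq_true_iff.mpr (Or.inl (stepA li hp '3' '5' "3" "4" "5" rfl rfl (by decide) (by decide) (by decide) hmem hpred))
              | exact Bool.or_eq_true_iff.mpr (Or.inr (stepA li hp '5' '3' "5" "4" "3" rfl rfl (by decide) (by decide) (by decide) hmem hpred))⟩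
          | exact ⟨["6","7","8"], by simp [valOrders], by
              unfold condA; rw [pyGetD3_zero, pyGetD3_one, pyGetD3_two]
              first
              | exact Bool.or_eq_true_iff.mpr (Or.inl (stepA li hp '6' '8' "6" "7" "8" rfl rfl (by decide) (by decide) (by decide) hmem hpred))
              | exact Bool.or_eq_true_iff.mpr (Or.inr (stepA li hp '8' '6' "8" "7" "6" rfl rfl (by decide) (by decide) (by decide) hmem hpred))⟩
          | exact ⟨["0","3","6"], by simp [valOrders], by
              unfold condA; rw [pyGetD3_zero, pyGetD3_one, pyGetD3_two]
              first
              | exact Bool.or_eq_true_iff.mpr (Or.inl (stepA li hp '0' '6' "0" "3" "6" rfl rfl (by decide) (by decide) (by decide) hmem hpred))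
              | exact Bool.or_eq_true_iff.mpr (Or.inr (stepA li hp '6' '0' "6" "3" "0" rfl rfl (by decide) (by decide) (by decide) hmem hpred))⟩
          | exact ⟨["1","4","7"], by simp [valOrders], by
              unfold condA; rw [pyGetD3_zero, pyGetD3_one, pyGetD3_two]
              first
              | exact Bool.or_eq_true_iff.mpr (Or.inl (stepA li hp '1' '7' "1" "4" "7" rfl rfl (by decide) (by decide) (by decide) hmem hpred))
              | exact Bool.or_eq_true_iff.mpr (Or.inr (stepA li hp '7' '1' "7" "4" "1" rfl rfl (by decide) (by decide) (by decide) hmem hpred))⟩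
          | exact ⟨["2","5","8"], by simp [valOrders], by
              unfold condA; rw [pyGetD3_zero, pyGetD3_one, pyGetD3_two]
              first
              | exact Bool.or_eq_true_iff.mpr (Or.inl (stepA li hp '2' '8' "2" "5" "8" rfl rfl (by decide) (by decide) (by decide) hmem hpred))
              | exact Bool.or_eq_true_iff.mpr (Or.inr (stepA li hp '8' '2' "8" "5" "2" rfl rfl (by decide) (by decide) (by decide) hmem hpred))⟩
          | exact ⟨["0","4","8"], by simp [valOrders], by
              unfold condA; rw [pyGetD3_zero, pyGetD3_one, pyGetD3_two]
              first
              | exact Bool.or_eq_true_iff.mpr (Or.inl (stepA li hp '0' '8' "0" "4" "8" rfl rfl (by decide) (by decide) (by decide) hmem hpred))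
              | exact Bool.or_eq_true_iff.mpr (Or.inr (stepA li hp '8' '0' "8" "4" "0" rfl rfl (by decide) (by decide) (by decide) hmem hpred))⟩
          | exact ⟨["2","4","6"], by simp [valOrders], by
              unfold condA; rw [pyGetD3_zero, pyGetD3_one, pyGetD3_two]
              first
              | exact Bool.or_eq_true_iff.mpr (Or.inl (stepA li hp '2' '6' "2" "4" "6" rfl rfl (by decide) (by decide) (by decide) hmem hpred))
              | exact Bool.or_eq_true_iff.mpr (Or.inr (stepA li hp '6' '2' "6" "4" "2" rfl rfl (by decide) (by decide) (by decide) hmem hpred))⟩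

-- ===== VERDICT (by name: the statement is the Claim_ definition above) =====
theorem getValidity_spec : Claim_equal_getValidity := by
  intro li state hdom hpre
  unfold Pre_getValidity at hpre
  show getValidity li state = getValidity_alt li state
  have hB : getValidity_alt li state = (!((li.zip li.tail).any (predB li)) && state) := by
    show goB (buildPos li) (PySem.List.len li) state (li.zip (PySem.List.slice li (some 1) none)) = _
    rw [PySem.List.len_eq, PySem.List.slice_from_one, goB_eq]
  rw [hB]
  show goA li state valOrders = _
  rw [goA_eq, any16 li hpre]
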